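-- pv_equiv track=rewrite | github.com/odinicc/Data-Practice | 25 Leetcode/697. Degree of an Array.py | max_sublen
-- ===== SOURCE A (Python) =====
-- def max_sublen(nums,elem):
--     for i in range(len(nums)):
--         if nums[i] == elem:
--             min_e = i
--             break
--     for i in range(len(nums)-1,-1,-1):
--         if nums[i] == elem:
--             max_e = i
--             break
--     return max_e - min_e+1
--
-- nums = [1,2,2,3,1,4,2]
-- ===== SOURCE B (Python) =====
-- def max_sublen(nums, elem):
--     first = last = None
--     for i, v in enumerate(nums):
--         if v == elem:
--             if first is None:
--                 first = i
--             last = i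
--     return last - first + 1
-- ===== Notes on version B (the rewrite author's own statement) =====
-- stated objective: simpler
-- what changed: Replaces A's two directed scans (forward for the first occurrence, backward for the last) with a single forward pass that tracks both the first and last matching index.
import Mathlib
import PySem

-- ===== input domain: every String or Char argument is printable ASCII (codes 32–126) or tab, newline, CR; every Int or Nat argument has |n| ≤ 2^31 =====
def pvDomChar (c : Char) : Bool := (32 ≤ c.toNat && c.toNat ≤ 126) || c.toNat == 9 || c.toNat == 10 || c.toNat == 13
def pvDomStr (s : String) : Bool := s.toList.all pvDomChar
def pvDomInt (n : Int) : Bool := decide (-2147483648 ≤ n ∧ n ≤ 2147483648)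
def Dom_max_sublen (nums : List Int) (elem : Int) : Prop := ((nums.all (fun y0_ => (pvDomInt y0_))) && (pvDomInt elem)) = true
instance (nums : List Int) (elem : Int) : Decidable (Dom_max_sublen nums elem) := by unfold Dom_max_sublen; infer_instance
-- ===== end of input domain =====

-- B changes the decomposition: one forward pass tracking first and last match, instead of
-- A's forward scan for the first occurrence plus a separate backward scan for the last.
-- Equivalence of return values on Pre_ (elem occurs in nums); outside it both Pythons raise.

-- ===== PORT A =====
-- first loop: for i in range(len(nums)): if nums[i] == elem: min_e = i; break
def aFirst (elem : Int) : List Int → Int → Option Int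
  | [], _ => none
  | x :: xs, i => if x = elem then some i else aFirst elem xs (i + 1)

-- second loop: for i in range(len(nums)-1,-1,-1): if nums[i] == elem: max_e = i; break
-- (fuel j+1 examines index j; indices scanned are all < nums.length, so getD is exact)
def aLast (nums : List Int) (elem : Int) : Nat → Option Int
  | 0 => none
  | i + 1 => if nums.getD i 0 = elem then some (i : Int) else aLast nums elem i

def max_sublen (nums : List Int) (elem : Int) : Int :=
  match aLast nums elem nums.length with
  | some mx =>
    match aFirst elem nums 0 with
    | some mn => mx - mn + 1
    | none => 0   -- unreachable under Pre_ (Python raises UnboundLocalError here)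
  | none => 0   -- unreachable under Pre_ (Python raises UnboundLocalError here)

-- ===== PORT B =====
def bStep (elem : Int) (st : Option Int × Option Int) (p : Int × Int) : Option Int × Option Int :=
  if p.2 = elem then (some (st.1.getD p.1), some p.1) else st

def max_sublen_alt (nums : List Int) (elem : Int) : Int :=
  match (PySem.List.enumerate nums).foldl (bStep elem) (none, none) with
  | (some f, some l) => l - f + 1
  | _ => 0   -- unreachable under Pre_ (Python raises TypeError here)

-- ===== PRECONDITION & SPEC =====
-- Pre_: elem occurs in nums; otherwise Python A raises UnboundLocalError (and B TypeError).
def Pre_max_sublen (nums : List Int) (elem : Int) : Prop := elem ∈ nums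
instance (nums : List Int) (elem : Int) : Decidable (Pre_max_sublen nums elem) := by
  unfold Pre_max_sublen; infer_instance
def pvWitness_max_sublen : List Int × Int := ([1, 2, 2, 3, 1, 4, 2], 2)

def Spec_max_sublen (nums : List Int) (elem : Int) (out : Int) : Prop := out = max_sublen_alt nums elem
instance (nums : List Int) (elem : Int) (out : Int) : Decidable (Spec_max_sublen nums elem out) := by unfold Spec_max_sublen; infer_instance

-- ===== CLAIM (what is proved, stated in full; the proofs are below) =====
def Claim_equal_max_sublen : Prop := ∀ (nums : List Int) (elem : Int), Dom_max_sublen nums elem → Pre_max_sublen nums elem → Spec_max_sublen nums elem (max_sublen nums elem)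

-- ===== LEMMAS AND PROOFS =====

-- last occurrence of elem in l (indices offset by s), head-recursive form used by the proofs
def lastFrom (elem : Int) : List Int → Int → Option Int
  | [], _ => none
  | x :: xs, s => (lastFrom elem xs (s + 1)).orElse (fun _ => if x = elem then some s else none)

theorem foldl_enum_inv (elem : Int) :
    ∀ (l : List Int) (s : Int) (st : Option Int × Option Int),
      (PySem.List.enumerate l s).foldl (bStep elem) st =
        (st.1.orElse (fun _ => aFirst elem l s), (lastFrom elem l s).orElse (fun _ => st.2)) := by
  intro l
  induction l with
  | nil => intro s st; simp [PySem.List.enumerate_nil, aFirst, lastFrom]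
  | cons x xs ih =>
    intro s st
    simp only [PySem.List.enumerate_cons, List.foldl_cons, ih, bStep, aFirst, lastFrom]
    by_cases hx : x = elem
    · simp only [hx]
      cases st.1 <;> cases lastFrom elem xs (s + 1) <;> simp [Option.orElse, Option.getD]
    · simp only [if_neg hx]
      cases st.1 <;> cases lastFrom elem xs (s + 1) <;> cases h2 : st.2 <;>
        simp [Option.orElse]

theorem aLast_append_le (elem : Int) (l : List Int) (x : Int) :
    ∀ i, i ≤ l.length → aLast (l ++ [x]) elem i = aLast l elem i := by
  intro i
  induction i with
  | zero => intro _; simp [aLast]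
  | succ j ih =>
    intro h
    have hj : j < l.length := by omega
    have hg : (l ++ [x])[j]? = l[j]? := List.getElem?_append_left hj
    simp [aLast, hg, ih (by omega)]

theorem lastFrom_append (elem : Int) (x : Int) :
    ∀ (l : List Int) (s : Int),
      lastFrom elem (l ++ [x]) s =
        if x = elem then some (s + l.length) else lastFrom elem l s := by
  intro l
  induction l with
  | nil => intro s; by_cases hx : x = elem <;> simp [lastFrom, hx, Option.orElse]
  | cons y ys ih =>
    intro s
    simp only [List.cons_append, lastFrom, ih]
    by_cases hx : x = elem
    · simp only [if_pos hx]
      have : s + (↑(ys.length) + 1) = s + 1 + (ys.length : Int) := by ring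
      simp [Option.orElse, List.length_cons, this]
    · simp [if_neg hx]

theorem aLast_eq_lastFrom (elem : Int) (nums : List Int) :
    aLast nums elem nums.length = lastFrom elem nums 0 := by
  induction nums using List.reverseRecOn with
  | nil => simp [aLast, lastFrom]
  | append_singleton l x ih =>
    have hlen : (l ++ [x]).length = l.length + 1 := by simp
    have hget : (l ++ [x]).getD l.length 0 = x := by
      simp [List.getD]
    rw [hlen]
    simp only [aLast, hget, lastFrom_append, aLast_append_le elem l x l.length le_rfl, ih]
    by_cases hx : x = elem <;> simp [hx]

theorem aFirst_isSome (elem : Int) :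
    ∀ (l : List Int) (s : Int), elem ∈ l → (aFirst elem l s).isSome := by
  intro l
  induction l with
  | nil => intro s h; simp at h
  | cons x xs ih =>
    intro s h
    by_cases hx : x = elem
    · simp [aFirst, hx]
    · have : elem ∈ xs := by
        rcases List.mem_cons.mp h with h1 | h1
        · exact absurd h1.symm hx
        · exact h1
      simp [aFirst, hx, ih (s + 1) this]

theorem lastFrom_isSome (elem : Int) :
    ∀ (l : List Int) (s : Int), elem ∈ l → (lastFrom elem l s).isSome := by
  intro l
  induction l with
  | nil => intro s h; simp at h
  | cons x xs ih =>
    intro s h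
    rcases List.mem_cons.mp h with h1 | h1
    · cases hr : lastFrom elem xs (s + 1) <;>
        simp [lastFrom, hr, Option.orElse, ← h1]
    · have := ih (s + 1) h1
      cases hr : lastFrom elem xs (s + 1) <;>
        simp [lastFrom, hr, Option.orElse] at this ⊢

-- ===== VERDICT (by name: the statement is the Claim_ definition above) =====
theorem max_sublen_spec : Claim_equal_max_sublen := by
  intro nums elem _ hpre
  unfold Spec_max_sublen max_sublen max_sublen_alt
  rw [foldl_enum_inv, aLast_eq_lastFrom]
  have hf := aFirst_isSome elem nums 0 hpre
  have hl := lastFrom_isSome elem nums 0 hpre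
  cases hfe : aFirst elem nums 0 with
  | none => rw [hfe] at hf; simp at hf
  | some mn =>
    cases hle : lastFrom elem nums 0 with
    | none => rw [hle] at hl; simp at hl
    | some mx => simp [Option.orElse]
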